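-- pv_equiv track=rewrite | github.com/qutip/qutip | qutip/core/energy_restricted.py | enr_nstates
-- ===== SOURCE A (Python) =====
-- import math
-- import itertools
--
-- def enr_nstates(dims, excitations):
--     """
--     Directly compute the number of states for a system with a given number of
--     components and maximum number of excitations, using the inclusion-exclusion
--     principle. Much faster than enumerating all states.
--
--     Parameters
--     ----------
--     dims: list of integers
--         A list with the number of states in each sub-system.
--
--     excitations : integer
--         The maximum number excitations across all sub-systems.
--
--     Returns
--     -------
--     nstates: integer
--         The number of states in the excitation-number restricted state space
--     """
--     if len(dims) == 0:
--         return 1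
--     m = len(dims)
--     kmax = min((excitations, sum(dims)))//min(dims)
--     if all(d == dims[0] for d in dims):  # this situation can be solved faster
--         return sum(
--             (-1)**k * math.comb(m, k) * math.comb(excitations-k*dims[0]+m, m)
--             for k in range(kmax+1))
--     else:  # in general, need to iterate over all subsets
--         return sum((-1)**k * math.comb(excitations + m - sum(subset), m)
--                    for k in range(kmax+1)
--                    for subset in itertools.combinations(dims, k)
--                    if sum(subset) < excitations+m)
-- ===== SOURCE B (Python) =====
-- import math
--
-- def enr_nstates(dims, excitations):
--     if not dims:
--         return 1
--     m = len(dims)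
--     kmax = min(excitations, sum(dims)) // min(dims)
--     bound = excitations + m
--     # Expand prod_d (1 - y * x**d) truncated at degree kmax in y: coeff[s, k] is
--     # the signed number of k-element sub-multisets of dims summing to s, so the
--     # inclusion-exclusion sum needs only one binomial per distinct (sum, size)
--     # class, and sizes beyond kmax never contribute.
--     coeff = {(0, 0): 1}
--     for d in dims:
--         for (s, k), c in list(coeff.items()):
--             if k < kmax:
--                 key = (s + d, k + 1)
--                 coeff[key] = coeff.get(key, 0) - c
--     return sum(c * math.comb(bound - s, m)
--                for (s, k), c in coeff.items()
--                if k <= kmax and s < bound)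
-- ===== Notes on version B (the rewrite author's own statement) =====
-- stated objective: alternative
-- what changed: Replaces A's explicit enumeration of subsets (itertools.combinations, size by size, plus a separate closed-form branch for equal dims) by expanding the polynomial prod(1 - y*x^d), truncated at degree kmax in y, into a dict of signed (subset-sum, subset-size) coefficients in one pass per subsystem, so each distinct (sum, size) class is weighted by a single binomial; Pre_ excludes exactly the inputs where A raises (min(dims)=0 -> ZeroDivisionError; equal negative dims with excitations+len(dims)<0 -> ValueError from a negative math.comb argument).
import Mathlib
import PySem

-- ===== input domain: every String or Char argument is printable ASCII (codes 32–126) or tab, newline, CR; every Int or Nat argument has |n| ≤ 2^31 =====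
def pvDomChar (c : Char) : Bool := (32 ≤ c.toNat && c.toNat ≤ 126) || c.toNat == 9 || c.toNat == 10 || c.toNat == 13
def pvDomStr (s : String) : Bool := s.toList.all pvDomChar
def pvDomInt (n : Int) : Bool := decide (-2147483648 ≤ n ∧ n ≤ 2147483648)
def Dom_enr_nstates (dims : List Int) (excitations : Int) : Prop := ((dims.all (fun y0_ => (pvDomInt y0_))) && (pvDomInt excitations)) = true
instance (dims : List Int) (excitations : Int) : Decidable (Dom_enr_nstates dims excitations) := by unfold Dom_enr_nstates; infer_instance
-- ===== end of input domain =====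

-- B replaces A's explicit enumeration of subsets by expanding the polynomial
-- ∏(1 - y·x^d), truncated at degree kmax in y, into a dict of signed (sum, size)
-- coefficients, so each distinct (sum, size) class is weighted by one binomial
-- instead of once per subset.

-- math.comb n k; Python raises ValueError for negative arguments — under
-- Pre_enr_nstates every comb either program evaluates has nonnegative arguments,
-- so the junk value 0 on negatives is never relied upon.
def pyComb (n k : Int) : Int := if n < 0 ∨ k < 0 then 0 else ((n.toNat.choose k.toNat : Nat) : Int)

-- ===== PORT A =====
def enr_nstates (dims : List Int) (excitations : Int) : Int :=
  if dims.length = 0 then 1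
  else
    let m : Int := (dims.length : Int)
    -- min(dims): dims is nonempty here, so min? is `some`; .getD 0 is never the default
    let kmax : Int := PySem.Int.floordiv (min excitations dims.sum)
      ((PySem.List.min? dims (fun x => x)).getD 0)
    -- dims[0]: in range since dims is nonempty
    let d0 : Int := (PySem.List.pyGet? dims 0).getD 0
    if dims.all (fun d => d == d0) then
      ((PySem.List.pyRange 0 (kmax + 1) 1).map (fun k =>
        (-1 : Int) ^ k.toNat * pyComb m k * pyComb (excitations - k * d0 + m) m)).sum
    else
      -- the `if sum(subset) < excitations+m` filter in A's genexpr is ported as an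
      -- if-then-else contributing 0, which leaves the sum unchanged
      ((PySem.List.pyRange 0 (kmax + 1) 1).map (fun k =>
        ((PySem.List.combinations dims k.toNat).map (fun S =>
          if S.sum < excitations + m then (-1 : Int) ^ k.toNat * pyComb (excitations + m - S.sum) m
          else 0)).sum)).sum

-- ===== PORT B =====
def enr_nstates_alt (dims : List Int) (excitations : Int) : Int :=
  if dims.length = 0 then 1
  else
    let m : Int := (dims.length : Int)
    let kmax : Int := PySem.Int.floordiv (min excitations dims.sum)
      ((PySem.List.min? dims (fun x => x)).getD 0)
    let bound : Int := excitations + m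
    -- for d in dims: for (s, k), c in list(coeff.items()): … — the inner loop runs
    -- over a snapshot of the items while the dict is updated, i.e. a fold over items
    let coeff : PySem.Dict (Int × Int) Int := dims.foldl
      (fun coeff d =>
        coeff.items.foldl
          (fun acc sc =>
            if sc.1.2 < kmax then
              acc.insert (sc.1.1 + d, sc.1.2 + 1) (acc.getD (sc.1.1 + d, sc.1.2 + 1) 0 - sc.2)
            else acc)
          coeff)
      (PySem.Dict.ofList [(((0 : Int), (0 : Int)), (1 : Int))])
    -- the `if k <= kmax and s < bound` filter of the final genexpr is ported as an
    -- if-then-else contributing 0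
    (coeff.items.map (fun sc =>
      if sc.1.2 ≤ kmax ∧ sc.1.1 < bound then sc.2 * pyComb (bound - sc.1.1) m else 0)).sum

-- ===== PRECONDITION & SPEC =====
-- Pre_ excludes exactly the inputs on which A raises: lists whose minimum is 0
-- (ZeroDivisionError in kmax = …//min(dims)), and lists of equal negative
-- dimensions with excitations + len(dims) < 0, where A's fast branch feeds a
-- negative argument to math.comb (ValueError).
def Pre_enr_nstates (dims : List Int) (excitations : Int) : Prop :=
  ((0 : Int) ∈ dims → ∃ d ∈ dims, d < 0) ∧
  (∀ x ∈ dims, (∀ y ∈ dims, y = x) → x < 0 → 0 ≤ excitations + (dims.length : Int))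
instance (dims : List Int) (excitations : Int) : Decidable (Pre_enr_nstates dims excitations) := by unfold Pre_enr_nstates; infer_instance
def pvWitness_enr_nstates : List Int × Int := ([2, 3], 2)

def Spec_enr_nstates (dims : List Int) (excitations : Int) (out : Int) : Prop := out = enr_nstates_alt dims excitations
instance (dims : List Int) (excitations : Int) (out : Int) : Decidable (Spec_enr_nstates dims excitations out) := by unfold Spec_enr_nstates; infer_instance

-- ===== CLAIM (what is proved, stated in full; the proofs are below) =====
def Claim_equal_enr_nstates : Prop := ∀ (dims : List Int) (excitations : Int), Dom_enr_nstates dims excitations → Pre_enr_nstates dims excitations → Spec_enr_nstates dims excitations (enr_nstates dims excitations)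

-- ===== LEMMAS AND PROOFS =====

lemma sum_map_neg_int {α : Type} (l : List α) (f : α → Int) :
    (l.map (fun x => - f x)).sum = - (l.map f).sum := by
  induction l with
  | nil => simp
  | cons x l ih => simp [ih]; ring

-- the value that B's DP state (s, k) will contribute to the final filtered sum,
-- with the remaining entries q still to be processed
def pvVal (kmax bound m : Int) : List Int → Int → Int → Int
  | [], s, k => if k ≤ kmax ∧ s < bound then pyComb (bound - s) m else 0
  | d :: q, s, k =>
      pvVal kmax bound m q s k
        - (if k < kmax then pvVal kmax bound m q (s + d) (k + 1) else 0)

-- all subsets (as sublists), the way A enumerates them: by size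
def allSubsets (p : List Int) : List (List Int) :=
  (List.range (p.length + 1)).flatMap (fun k => PySem.List.combinations p k)

lemma mem_allSubsets_sublist {S p : List Int} (h : S ∈ allSubsets p) : S.Sublist p := by
  obtain ⟨j, _, hj⟩ := List.mem_flatMap.mp h
  exact ((PySem.List.mem_combinations_iff p j S).mp hj).1

-- summing over allSubsets is the double sum "by size k" that A uses
lemma sum_allSubsets_eq (q : List Int) (h : List Int → Int) : ((allSubsets q).map h).sum
    = ((List.range (q.length + 1)).map (fun k => ((PySem.List.combinations q k).map h).sum)).sum := by
  unfold allSubsets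
  induction (List.range (q.length + 1)) with
  | nil => simp
  | cons k ks ih => simp [List.flatMap_cons, ih]

-- sum over all subsets of d :: p splits into subsets avoiding d and subsets containing d
lemma sum_allSubsets_cons (d : Int) (p : List Int) (g : List Int → Int) :
    ((allSubsets (d :: p)).map g).sum
      = ((allSubsets p).map g).sum + ((allSubsets p).map (fun S => g (d :: S))).sum := by
  have hC : ∀ (q : List Int) (n : Nat), ((List.range (n + 1)).map
        (fun k => ((PySem.List.combinations q k).map g).sum)).sum
      = g [] + ((List.range n).map (fun k => ((PySem.List.combinations q (k + 1)).map g).sum)).sum := by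
    intro q n
    rw [List.range_succ_eq_map]
    simp [PySem.List.combinations_zero, List.map_map, Function.comp_def, Nat.succ_eq_add_one]
  rw [sum_allSubsets_eq, sum_allSubsets_eq, sum_allSubsets_eq (h := fun S => g (d :: S))]
  have hlen : (d :: p).length + 1 = (p.length + 1) + 1 := by simp
  rw [hlen, hC (d :: p) (p.length + 1)]
  have hsplit : ∀ k, ((PySem.List.combinations (d :: p) (k + 1)).map g).sum
      = ((PySem.List.combinations p k).map (fun S => g (d :: S))).sum
        + ((PySem.List.combinations p (k + 1)).map g).sum := by
    intro k
    rw [PySem.List.combinations_cons_succ]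
    simp [List.map_map, Function.comp_def]
  calc g [] + ((List.range (p.length + 1)).map
          (fun k => ((PySem.List.combinations (d :: p) (k + 1)).map g).sum)).sum
      = g [] + (((List.range (p.length + 1)).map
            (fun k => ((PySem.List.combinations p k).map (fun S => g (d :: S))).sum)).sum
          + ((List.range (p.length + 1)).map
            (fun k => ((PySem.List.combinations p (k + 1)).map g).sum)).sum) := by
        rw [List.map_congr_left (fun k _ => hsplit k), PySem.List.sum_map_add_int]
    _ = (g [] + ((List.range (p.length + 1)).map
            (fun k => ((PySem.List.combinations p (k + 1)).map g).sum)).sum)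
          + ((List.range (p.length + 1)).map
            (fun k => ((PySem.List.combinations p k).map (fun S => g (d :: S))).sum)).sum := by ring
    _ = ((List.range (p.length + 1 + 1)).map
            (fun k => ((PySem.List.combinations p k).map g).sum)).sum
          + ((List.range (p.length + 1)).map
            (fun k => ((PySem.List.combinations p k).map (fun S => g (d :: S))).sum)).sum := by
        rw [hC p (p.length + 1)]
    _ = ((List.range (p.length + 1)).map
            (fun k => ((PySem.List.combinations p k).map g).sum)).sum
          + ((List.range (p.length + 1)).map
            (fun k => ((PySem.List.combinations p k).map (fun S => g (d :: S))).sum)).sum := by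
        rw [List.range_succ (n := p.length + 1)]
        simp [PySem.List.combinations_eq_nil_of_length_lt p (Nat.lt_succ_self _)]

-- closed form of pvVal: the guarded inclusion-exclusion sum over all subsets of q
lemma pvVal_closed (kmax bound m : Int) (q : List Int) (s k : Int) :
    pvVal kmax bound m q s k
      = ((allSubsets q).map (fun S =>
          if k + (S.length : Int) ≤ kmax ∧ s + S.sum < bound then
            (-1 : Int) ^ S.length * pyComb (bound - s - S.sum) m
          else 0)).sum := by
  induction q generalizing s k with
  | nil =>
    simp only [allSubsets, List.length_nil, zero_add, List.range_one, List.flatMap_cons,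
      PySem.List.combinations_zero, List.flatMap_nil, List.append_nil, List.map_cons,
      List.map_nil, List.sum_cons, List.sum_nil, add_zero]
    simp only [pvVal, Nat.cast_zero, add_zero, pow_zero, one_mul, sub_zero]
  | cons d q ih =>
    rw [sum_allSubsets_cons]
    simp only [pvVal]
    by_cases hcond : k < kmax
    · rw [if_pos hcond, ih s k, ih (s + d) (k + 1), sub_eq_add_neg]
      congr 1
      rw [← sum_map_neg_int]
      apply congrArg
      apply List.map_congr_left
      intro S _
      by_cases hS : (k + 1) + (S.length : Int) ≤ kmax ∧ (s + d) + S.sum < bound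
      · rw [if_pos hS, if_pos (by
          simp only [List.length_cons, List.sum_cons]
          push_cast
          omega)]
        simp only [List.length_cons, List.sum_cons, pow_succ]
        have h1 : bound - s - (d + S.sum) = bound - (s + d) - S.sum := by ring
        rw [h1]
        ring
      · rw [if_neg hS, neg_zero, if_neg (by
          simp only [List.length_cons, List.sum_cons]
          push_cast
          omega)]
    · rw [if_neg hcond, sub_zero, ih s k]
      have hzero : ((allSubsets q).map (fun S =>
          if k + ((d :: S).length : Int) ≤ kmax ∧ s + (d :: S).sum < bound then
            (-1 : Int) ^ (d :: S).length * pyComb (bound - s - (d :: S).sum) m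
          else 0)).sum = 0 := by
        apply List.sum_eq_zero
        intro t ht
        obtain ⟨S, _, rfl⟩ := List.mem_map.mp ht
        rw [if_neg]
        intro ⟨h1, _⟩
        simp only [List.length_cons] at h1
        push_cast at h1
        have : (0 : Int) ≤ (S.length : Int) := by positivity
        omega
      omega

-- ---------- B side: the dict fold computes pvVal ----------

-- replacing the unique entry with key K by (K, v) shifts a weighted sum by the difference
lemma replace_sum {κ : Type} [BEq κ] [LawfulBEq κ] (l : List (κ × Int)) (K : κ) (v v0 : Int)
    (w : κ → Int) (hnd : (l.map Prod.fst).Nodup) (hmem : (K, v0) ∈ l) :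
    ((l.map (fun p => if p.1 == K then (K, v) else p)).map (fun e => e.2 * w e.1)).sum
      = (l.map (fun e => e.2 * w e.1)).sum - v0 * w K + v * w K := by
  induction l with
  | nil => simp at hmem
  | cons e t ih =>
    simp only [List.map_cons, List.nodup_cons] at hnd ⊢
    simp only [List.mem_cons] at hmem
    rcases hmem with heq | hmem
    · obtain rfl := heq.symm
      have htK : ∀ p ∈ t, (if p.1 == K then (K, v) else p) = p := by
        intro p hp
        have hne : ¬ (p.1 == K) = true := by
          simp only [beq_iff_eq]
          intro hpK
          apply hnd.1
          rw [← hpK]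
          exact List.mem_map.mpr ⟨p, hp, rfl⟩
        simp [hne]
      rw [List.map_congr_left htK]
      simp only [List.sum_cons]
      norm_num
      ring
    · have he : ¬ (e.1 == K) = true := by
        simp only [beq_iff_eq]
        intro hpK
        apply hnd.1
        rw [hpK]
        exact List.mem_map.mpr ⟨(K, v0), hmem, rfl⟩
      rw [if_neg he]
      simp only [List.sum_cons]
      rw [ih hnd.2 hmem]
      ring

-- inserting K ↦ getD K 0 - c shifts the weighted item sum by -c * w K
lemma sum_items_insert_sub {κ : Type} [BEq κ] [LawfulBEq κ] (d : PySem.Dict κ Int) (K : κ)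
    (c : Int) (w : κ → Int) (hnd : d.keys.Nodup) :
    (((d.insert K (d.getD K 0 - c)).items).map (fun e => e.2 * w e.1)).sum
      = ((d.items).map (fun e => e.2 * w e.1)).sum - c * w K := by
  by_cases hc : d.contains K = true
  · obtain ⟨v0, hv0⟩ : ∃ v0, d.get? K = some v0 := by
      have := PySem.Dict.contains_eq_isSome_get? (d := d) (k := K)
      rw [hc] at this
      exact Option.isSome_iff_exists.mp this.symm
    have hmem : (K, v0) ∈ d.items := PySem.Dict.mem_items_of_get?_eq_some (d := d) hv0
    have hgetD : d.getD K 0 = v0 := PySem.Dict.getD_of_get?_eq_some d 0 hv0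
    rw [PySem.Dict.items_insert_of_contains d _ hc,
      replace_sum d.items K (d.getD K 0 - c) v0 w hnd hmem, hgetD]
    ring
  · rw [PySem.Dict.items_insert_of_not_contains d _ (by simpa using hc),
      PySem.Dict.getD_of_not_contains d 0 (by simpa using hc)]
    simp
    ring

lemma inner_nodup (kmax d : Int) (l : List ((Int × Int) × Int))
    (acc : PySem.Dict (Int × Int) Int) (h : acc.keys.Nodup) :
    (l.foldl (fun acc sc =>
      if sc.1.2 < kmax then
        acc.insert (sc.1.1 + d, sc.1.2 + 1) (acc.getD (sc.1.1 + d, sc.1.2 + 1) 0 - sc.2)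
      else acc)
      acc).keys.Nodup := by
  induction l generalizing acc with
  | nil => exact h
  | cons sc l ih =>
    simp only [List.foldl_cons]
    apply ih
    split_ifs with hlt
    · exact PySem.Dict.nodup_keys_insert _ _ _ h
    · exact h

-- one pass of B's inner loop shifts the weighted item sum by the signed insertions
lemma inner_total (kmax d : Int) (w : Int × Int → Int) :
    ∀ (l : List ((Int × Int) × Int)) (acc : PySem.Dict (Int × Int) Int), acc.keys.Nodup →
    ((l.foldl (fun acc sc =>
        if sc.1.2 < kmax then
          acc.insert (sc.1.1 + d, sc.1.2 + 1) (acc.getD (sc.1.1 + d, sc.1.2 + 1) 0 - sc.2)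
        else acc)
        acc).items.map (fun e => e.2 * w e.1)).sum
      = (acc.items.map (fun e => e.2 * w e.1)).sum
        + (l.map (fun sc =>
            if sc.1.2 < kmax then - sc.2 * w (sc.1.1 + d, sc.1.2 + 1) else 0)).sum := by
  intro l
  induction l with
  | nil => intro acc _; simp
  | cons sc l ih =>
    intro acc hnd
    simp only [List.foldl_cons, List.map_cons, List.sum_cons]
    split_ifs with hcond
    · rw [ih _ (PySem.Dict.nodup_keys_insert _ _ _ hnd),
        sum_items_insert_sub acc _ sc.2 w hnd]
      ring
    · rw [ih _ hnd]
      ring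

-- running B's outer fold turns the end weight into pvVal over the remaining list
lemma run_total (kmax bound m : Int) :
    ∀ (q : List Int) (c : PySem.Dict (Int × Int) Int), c.keys.Nodup →
    (((q.foldl
        (fun (coeff : PySem.Dict (Int × Int) Int) d =>
          coeff.items.foldl
            (fun acc sc =>
              if sc.1.2 < kmax then
                acc.insert (sc.1.1 + d, sc.1.2 + 1) (acc.getD (sc.1.1 + d, sc.1.2 + 1) 0 - sc.2)
              else acc)
            coeff)
        c).items).map
      (fun e => e.2 * (if e.1.2 ≤ kmax ∧ e.1.1 < bound then pyComb (bound - e.1.1) m else 0))).sum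
      = (c.items.map (fun e => e.2 * pvVal kmax bound m q e.1.1 e.1.2)).sum := by
  intro q
  induction q with
  | nil =>
    intro c _
    simp only [List.foldl_nil]
    apply congrArg
    apply List.map_congr_left
    intro e _
    rfl
  | cons d q ih =>
    intro c hnd
    simp only [List.foldl_cons]
    rw [ih _ (inner_nodup kmax d c.items c hnd),
      inner_total kmax d (fun K => pvVal kmax bound m q K.1 K.2) c.items c hnd,
      ← PySem.List.sum_map_add_int]
    apply congrArg
    apply List.map_congr_left
    intro e _
    simp only [pvVal]
    split_ifs with hcond
    · ring
    · ring

-- the common middle form: the truncated inclusion-exclusion sum over all subsets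
def Wmid (dims : List Int) (exc kcap : Int) : Int :=
  ((allSubsets dims).map (fun S =>
    if (S.length : Int) ≤ kcap ∧ S.sum < exc + (dims.length : Int) then
      (-1 : Int) ^ S.length * pyComb (exc + (dims.length : Int) - S.sum) (dims.length : Int)
    else 0)).sum

lemma B_eq (dims : List Int) (exc : Int) (hne : dims ≠ []) :
    enr_nstates_alt dims exc
      = Wmid dims exc
          (min (PySem.Int.floordiv (min exc dims.sum)
            ((PySem.List.min? dims (fun x => x)).getD 0)) (dims.length : Int)) := by
  unfold enr_nstates_alt
  rw [if_neg (by simpa using hne)]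
  simp only []
  set kmax : Int := PySem.Int.floordiv (min exc dims.sum)
    ((PySem.List.min? dims (fun x => x)).getD 0) with hkmax
  set m : Int := (dims.length : Int) with hm
  set bound : Int := exc + m with hbound
  have hw : (fun (sc : (Int × Int) × Int) =>
      if sc.1.2 ≤ kmax ∧ sc.1.1 < bound then sc.2 * pyComb (bound - sc.1.1) m else 0)
      = (fun sc => sc.2 * (if sc.1.2 ≤ kmax ∧ sc.1.1 < bound then pyComb (bound - sc.1.1) m else 0)) := by
    funext sc
    split_ifs with h <;> simp
  rw [hw]
  rw [run_total kmax bound m dims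
    (PySem.Dict.ofList [(((0 : Int), (0 : Int)), (1 : Int))]) (by decide)]
  have hitems : (PySem.Dict.ofList [(((0 : Int), (0 : Int)), (1 : Int))]).items
      = [(((0 : Int), (0 : Int)), (1 : Int))] := rfl
  rw [hitems]
  simp only [List.map_cons, List.map_nil, List.sum_cons, List.sum_nil, add_zero, one_mul]
  rw [pvVal_closed kmax bound m dims 0 0]
  unfold Wmid
  apply congrArg
  apply List.map_congr_left
  intro S hS
  have hlm : (S.length : Int) ≤ m := by
    have := (mem_allSubsets_sublist hS).length_le
    simp only [hm]
    omega
  by_cases hc : (S.length : Int) ≤ kmax ∧ S.sum < bound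
  · rw [if_pos (by omega : (0:Int) + (S.length : Int) ≤ kmax ∧ (0:Int) + S.sum < bound),
      if_pos ⟨le_min hc.1 hlm, by simp only [hbound, hm] at hc ⊢; omega⟩]
    congr 2
    omega
  · rw [if_neg (by omega), if_neg (by
      intro ⟨h1, h2⟩
      have := min_le_left kmax m
      omega)]

-- a negative size cap empties the guarded sum
lemma Wmid_zero_of_neg (dims : List Int) (exc kcap : Int) (hk : kcap < 0) :
    Wmid dims exc kcap = 0 := by
  unfold Wmid
  apply List.sum_eq_zero
  intro t ht
  obtain ⟨S, _, rfl⟩ := List.mem_map.mp ht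
  rw [if_neg]
  intro ⟨h1, _⟩
  have : (0 : Int) ≤ (S.length : Int) := by positivity
  omega

-- ---------- A side ----------

lemma length_combinations {α : Type} (xs : List α) (r : Nat) :
    (PySem.List.combinations xs r).length = xs.length.choose r := by
  induction xs generalizing r with
  | nil =>
    cases r with
    | zero => simp [PySem.List.combinations_zero]
    | succ r => simp [PySem.List.combinations_nil_succ]
  | cons x xs ih =>
    cases r with
    | zero => simp [PySem.List.combinations_zero]
    | succ r =>
      rw [PySem.List.combinations_cons_succ]
      simp [ih, Nat.choose_succ_succ']

-- trim or extend a range sum whose tail blocks vanish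
lemma sum_range_eq_of_zero_tail (f : Nat → Int) (a b : Nat) (hab : a ≤ b)
    (hz : ∀ k, a ≤ k → k < b → f k = 0) :
    ((List.range b).map f).sum = ((List.range a).map f).sum := by
  induction b, hab using Nat.le_induction with
  | base => rfl
  | succ b hb ih =>
    rw [List.range_succ, List.map_append, List.sum_append]
    simp [hz b hb (by omega), ih (fun k hk hk' => hz k hk (by omega))]

-- A's general-branch block of size k, with the size guard of Wmid added
lemma gblock_sum (dims : List Int) (exc kmax : Int) (hk0 : 0 ≤ kmax) :
    ((List.range ((kmax + 1).toNat)).map (fun k =>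
      ((PySem.List.combinations dims k).map (fun S =>
        if S.sum < exc + (dims.length : Int) then
          (-1 : Int) ^ k * pyComb (exc + (dims.length : Int) - S.sum) (dims.length : Int)
        else 0)).sum)).sum
    = Wmid dims exc (min kmax (dims.length : Int)) := by
  set m : Int := (dims.length : Int) with hm
  set bound : Int := exc + m with hbound
  set kcap : Int := min kmax m with hkcap
  set gblock : Nat → Int := fun k =>
    ((PySem.List.combinations dims k).map (fun S =>
      if (k : Int) ≤ kcap ∧ S.sum < bound then (-1 : Int) ^ k * pyComb (bound - S.sum) m
      else 0)).sum with hgblock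
  have hW : Wmid dims exc kcap = ((List.range (dims.length + 1)).map gblock).sum := by
    unfold Wmid
    rw [sum_allSubsets_eq]
    apply congrArg
    apply List.map_congr_left
    intro k _
    rw [hgblock]
    apply congrArg
    apply List.map_congr_left
    intro S hS
    rw [PySem.List.length_of_mem_combinations hS]
  rw [hW]
  have hsame : ∀ k ∈ List.range ((kmax + 1).toNat),
      ((PySem.List.combinations dims k).map (fun S =>
        if S.sum < bound then (-1 : Int) ^ k * pyComb (bound - S.sum) m else 0)).sum
        = gblock k := by
    intro k hk
    have hkk : (k : Int) ≤ kmax := by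
      have := List.mem_range.mp hk
      omega
    by_cases hkm : k ≤ dims.length
    · rw [hgblock]
      apply congrArg
      apply List.map_congr_left
      intro S _
      have : (k : Int) ≤ kcap := by
        rw [hkcap, hm]
        omega
      by_cases hb : S.sum < bound
      · rw [if_pos hb, if_pos ⟨this, hb⟩]
      · rw [if_neg hb, if_neg (by tauto)]
    · rw [hgblock]
      simp only []
      rw [PySem.List.combinations_eq_nil_of_length_lt dims (r := k) (by omega)]
      simp
  rw [List.map_congr_left hsame]
  rcases le_or_gt ((kmax + 1).toNat) (dims.length + 1) with hle | hgt
  · apply (sum_range_eq_of_zero_tail gblock _ _ hle _).symm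
    intro k hk _
    rw [hgblock]
    simp only []
    apply List.sum_eq_zero
    intro t ht
    obtain ⟨S, _, rfl⟩ := List.mem_map.mp ht
    rw [if_neg]
    intro ⟨h1, _⟩
    rw [hkcap] at h1
    omega
  · apply sum_range_eq_of_zero_tail gblock _ _ (by omega)
    intro k hk _
    rw [hgblock]
    simp only []
    rw [PySem.List.combinations_eq_nil_of_length_lt dims (r := k) (by omega)]
    simp

-- under the equal-dims hypothesis, one summand of A's fast branch equals the
-- corresponding guarded by-size block
lemma equal_block (dims : List Int) (exc x kmax : Int) (hne : dims ≠ [])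
    (hall : ∀ y ∈ dims, y = x) (hx : x ≠ 0)
    (hbnd : x < 0 → 0 ≤ exc + (dims.length : Int))
    (hkx : 0 < x → kmax * x ≤ min exc dims.sum) (k : Nat) (hk : (k : Int) ≤ kmax) :
    (-1 : Int) ^ k * pyComb (dims.length : Int) (k : Int)
        * pyComb (exc - (k : Int) * x + (dims.length : Int)) (dims.length : Int)
      = ((PySem.List.combinations dims k).map (fun S =>
          if S.sum < exc + (dims.length : Int) then
            (-1 : Int) ^ k * pyComb (exc + (dims.length : Int) - S.sum) (dims.length : Int)
          else 0)).sum := by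
  have hm1 : 1 ≤ (dims.length : Int) := by
    have := List.length_pos_iff.mpr hne
    omega
  set m : Int := (dims.length : Int) with hm
  set bound : Int := exc + m with hbound
  by_cases hkm : k ≤ dims.length
  · set c : Int := if (k : Int) * x < bound then (-1 : Int) ^ k * pyComb (bound - (k : Int) * x) m else 0 with hc
    have hsum : ∀ S ∈ PySem.List.combinations dims k,
        (if S.sum < bound then (-1 : Int) ^ k * pyComb (bound - S.sum) m else 0) = c := by
      intro S hS
      obtain ⟨hSub, hlen⟩ := (PySem.List.mem_combinations_iff dims k S).mp hS
      have hSsum : S.sum = (k : Int) * x := by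
        rw [List.sum_eq_card_nsmul S x (fun y hy => hall y (hSub.subset hy)), hlen]
        simp
      rw [hSsum, hc]
    rw [List.map_congr_left hsum]
    have hconst : ((PySem.List.combinations dims k).map (fun _ => c)).sum
        = (dims.length.choose k : Int) * c := by
      simp [length_combinations]
    rw [hconst]
    have hcomb : pyComb m (k : Int) = (dims.length.choose k : Int) := by
      unfold pyComb
      rw [if_neg (by omega)]
      simp [hm]
    rw [hcomb]
    by_cases hkxb : (k : Int) * x < bound
    · have harg : exc - (k : Int) * x + m = bound - (k : Int) * x := by ring
      rw [harg, hc, if_pos hkxb]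
      ring
    · rw [hc, if_neg hkxb, mul_zero]
      rcases lt_or_gt_of_ne hx with hneg | hpos
      · -- x < 0: then k*x ≤ 0 ≤ bound ≤ k*x, so the argument is exactly 0
        have h0b : 0 ≤ bound := hbnd hneg
        have hkx0 : (k : Int) * x ≤ 0 := mul_nonpos_of_nonneg_of_nonpos (by omega) (by omega)
        have harg0 : exc - (k : Int) * x + m = 0 := by omega
        rw [harg0]
        unfold pyComb
        rw [if_neg (by omega)]
        have : (0 : Int).toNat.choose m.toNat = 0 := Nat.choose_eq_zero_of_lt (by omega)
        rw [this]
        simp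
      · -- x > 0: k*x ≤ kmax*x ≤ min exc dims.sum ≤ exc < bound, contradiction
        exfalso
        have h1 : (k : Int) * x ≤ kmax * x := by
          apply mul_le_mul_of_nonneg_right hk (by omega)
        have h2 := hkx hpos
        have hminle : min exc dims.sum ≤ exc := min_le_left _ _
        omega
  · rw [PySem.List.combinations_eq_nil_of_length_lt dims (r := k) (by omega)]
    have : pyComb m (k : Int) = 0 := by
      unfold pyComb
      rw [if_neg (by omega)]
      have : m.toNat.choose (k : Int).toNat = 0 := by
        apply Nat.choose_eq_zero_of_lt
        simp [hm]
        omega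
      rw [this]
      simp
    rw [this]
    simp

lemma A_eq (dims : List Int) (exc : Int) (hne : dims ≠ [])
    (hpre : Pre_enr_nstates dims exc)
    (hk0 : 0 ≤ PySem.Int.floordiv (min exc dims.sum)
      ((PySem.List.min? dims (fun x => x)).getD 0)) :
    enr_nstates dims exc
      = Wmid dims exc
          (min (PySem.Int.floordiv (min exc dims.sum)
            ((PySem.List.min? dims (fun x => x)).getD 0)) (dims.length : Int)) := by
  obtain ⟨dm, hmn⟩ : ∃ dm, PySem.List.min? dims (fun x => x) = some dm := by
    cases h : PySem.List.min? dims (fun x => x) with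
    | none => exact absurd ((PySem.List.min?_eq_none_iff dims _).mp h) hne
    | some dm => exact ⟨dm, rfl⟩
  have hdm : dm ∈ dims := PySem.List.min?_mem hmn
  obtain ⟨x, xs, rfl⟩ := List.exists_cons_of_ne_nil hne
  have hget0 : (PySem.List.pyGet? (x :: xs) 0).getD 0 = x := by
    simp [PySem.List.pyGet?, PySem.List.pyIdx?]
  unfold enr_nstates
  rw [if_neg (by simp)]
  simp only []
  rw [hmn, hget0]
  rw [hmn] at hk0
  simp only [Option.getD_some] at hk0 ⊢
  set kmax : Int := PySem.Int.floordiv (min exc (x :: xs).sum) dm with hkmax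
  rw [show kmax + 1 = (((kmax + 1).toNat : Nat) : Int) by omega]
  rw [PySem.List.pyRange_zero_natCast]
  simp only [List.map_map]
  by_cases hall : (x :: xs).all (fun d => d == x) = true
  · rw [if_pos hall]
    have hally : ∀ y ∈ x :: xs, y = x := by
      intro y hy
      simpa using List.all_eq_true.mp hall y hy
    have hx0 : x ≠ 0 := by
      intro hx
      subst hx
      obtain ⟨d, hd, hdneg⟩ := hpre.1 List.mem_cons_self
      have := hally d hd
      omega
    have hbnd : x < 0 → 0 ≤ exc + ((x :: xs).length : Int) :=
      fun hneg => hpre.2 x List.mem_cons_self hally hneg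
    have hdmx : dm = x := hally dm hdm
    have hkxle : 0 < x → kmax * x ≤ min exc (x :: xs).sum := by
      intro hpos
      have hkx : kmax = PySem.Int.floordiv (min exc (x :: xs).sum) x := by
        rw [hkmax, hdmx]
      rw [hkx]
      have hfm := PySem.Int.floordiv_mul_add_mod (min exc (x :: xs).sum) x
      have hm2 := PySem.Int.mod_nonneg (a := min exc (x :: xs).sum) hpos
      omega
    simp only [Function.comp_def, Int.toNat_natCast]
    rw [List.map_congr_left (fun k hk => equal_block (x :: xs) exc x kmax
      (List.cons_ne_nil x xs) hally hx0 hbnd hkxle k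
      (by have := List.mem_range.mp hk; omega))]
    exact gblock_sum (x :: xs) exc kmax hk0
  · rw [if_neg hall]
    simp only [Function.comp_def, Int.toNat_natCast]
    exact gblock_sum (x :: xs) exc kmax hk0

-- when kmax < 0 A's range is empty
lemma A_zero (dims : List Int) (exc : Int) (hne : dims ≠ [])
    (hklt : PySem.Int.floordiv (min exc dims.sum)
      ((PySem.List.min? dims (fun x => x)).getD 0) < 0) :
    enr_nstates dims exc = 0 := by
  unfold enr_nstates
  rw [if_neg (by simpa using hne)]
  simp only []
  rw [PySem.List.pyRange_one_eq_nil (by omega)]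
  split_ifs <;> simp

-- ===== VERDICT (by name: the statement is the Claim_ definition above) =====
theorem enr_nstates_spec : Claim_equal_enr_nstates := by
  intro dims exc _hdom hpre
  unfold Spec_enr_nstates
  by_cases hne : dims = []
  · subst hne
    rfl
  · rcases lt_or_ge (PySem.Int.floordiv (min exc dims.sum)
      ((PySem.List.min? dims (fun x => x)).getD 0)) 0 with hklt | hk0
    · rw [A_zero dims exc hne hklt, B_eq dims exc hne,
        Wmid_zero_of_neg dims exc _ (by
          have := min_le_left (PySem.Int.floordiv (min exc dims.sum)
            ((PySem.List.min? dims (fun x => x)).getD 0)) (dims.length : Int)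
          omega)]
    · rw [A_eq dims exc hne hpre hk0, B_eq dims exc hne]
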